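-- pv_equiv track=rewrite | github.com/dapitch666/AdventOfCodePython | aoc/year2025/day09.py | index_segments
-- ===== SOURCE A (Python) =====
-- from typing import List, Tuple, Dict
--
-- def index_segments(verticals, horizontals):
--     """Build dicts:
--        v_by_x: x -> list of (y1,y2)
--        h_by_y: y -> list of (x1,x2)
--        and sorted lists of keys for bisect.
--     """
--     v_by_x: Dict[int, List[Tuple[int,int]]] = {}
--     for x, y1, y2 in verticals:
--         v_by_x.setdefault(x, []).append((y1,y2))
--     h_by_y: Dict[int, List[Tuple[int,int]]] = {}
--     for y, x1, x2 in horizontals: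
--         h_by_y.setdefault(y, []).append((x1,x2))
--
--     v_x_keys = sorted(v_by_x.keys())
--     h_y_keys = sorted(h_by_y.keys())
--     return v_by_x, v_x_keys, h_by_y, h_y_keys
-- ===== SOURCE B (Python) =====
-- def index_segments(verticals, horizontals):
--     """Build dicts:
--        v_by_x: x -> list of (y1,y2)
--        h_by_y: y -> list of (x1,x2)
--        and sorted lists of keys for bisect.
--     """
--     def group(segs):
--         keys = list(dict.fromkeys(s[0] for s in segs))
--         table = {k: [(a, b) for kk, a, b in segs if kk == k] for k in keys}
--         return table, sorted(keys)
--     v_by_x, v_x_keys = group(verticals)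
--     h_by_y, h_y_keys = group(horizontals)
--     return v_by_x, v_x_keys, h_by_y, h_y_keys
-- ===== Notes on version B (the rewrite author's own statement) =====
-- stated objective: alternative
-- what changed: A builds each dict incrementally with setdefault-append in one pass; B first deduplicates the keys in first-occurrence order and then builds each key's group by a per-key filter comprehension, sorting the dedup list for the key lists.
import Mathlib
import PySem

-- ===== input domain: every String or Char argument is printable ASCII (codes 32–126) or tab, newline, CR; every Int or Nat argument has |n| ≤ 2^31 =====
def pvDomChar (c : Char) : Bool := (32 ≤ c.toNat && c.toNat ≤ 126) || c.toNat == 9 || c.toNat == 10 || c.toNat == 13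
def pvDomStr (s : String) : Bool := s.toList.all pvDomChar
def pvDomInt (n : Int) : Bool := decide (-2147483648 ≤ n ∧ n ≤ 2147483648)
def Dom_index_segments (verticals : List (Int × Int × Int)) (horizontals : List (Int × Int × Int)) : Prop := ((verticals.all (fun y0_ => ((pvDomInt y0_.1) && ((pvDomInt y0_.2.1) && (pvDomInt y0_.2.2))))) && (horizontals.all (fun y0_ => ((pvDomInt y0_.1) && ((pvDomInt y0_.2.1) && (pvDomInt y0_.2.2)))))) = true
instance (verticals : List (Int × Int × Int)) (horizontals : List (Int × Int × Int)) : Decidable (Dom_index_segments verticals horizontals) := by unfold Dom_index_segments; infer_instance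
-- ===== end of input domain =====

-- B replaces A's incremental setdefault-append dict building by dedup-then-filter grouping (alternative decomposition, not faster).

-- ===== PORT A =====
-- for x, y1, y2 in verticals: v_by_x.setdefault(x, []).append((y1,y2))  ≡  d[x] = d.get(x, []) + [(y1,y2)]
def index_segments (verticals : List (Int × Int × Int)) (horizontals : List (Int × Int × Int)) : (List (Int × List (Int × Int))) × List Int × (List (Int × List (Int × Int))) × List Int :=
  let v_by_x : PySem.Dict Int (List (Int × Int)) :=
    verticals.foldl (fun d t => d.modify t.1 [] (fun l => l ++ [(t.2.1, t.2.2)])) PySem.Dict.empty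
  let h_by_y : PySem.Dict Int (List (Int × Int)) :=
    horizontals.foldl (fun d t => d.modify t.1 [] (fun l => l ++ [(t.2.1, t.2.2)])) PySem.Dict.empty
  let v_x_keys := PySem.List.sorted v_by_x.keys (fun k => k) false
  let h_y_keys := PySem.List.sorted h_by_y.keys (fun k => k) false
  (v_by_x.items, v_x_keys, h_by_y.items, h_y_keys)

-- ===== PORT B =====
-- group(segs): keys = list(dict.fromkeys(…)); table = {k: [(a,b) for kk,a,b in segs if kk == k] for k in keys}
def pvGroup (segs : List (Int × Int × Int)) : (List (Int × List (Int × Int))) × List Int :=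
  let keys := PySem.List.dedup (segs.map (·.1))
  (keys.map (fun k => (k, (segs.filter (fun t => t.1 == k)).map (fun t => (t.2.1, t.2.2)))),
   PySem.List.sorted keys (fun k => k) false)

def index_segments_alt (verticals : List (Int × Int × Int)) (horizontals : List (Int × Int × Int)) : (List (Int × List (Int × Int))) × List Int × (List (Int × List (Int × Int))) × List Int :=
  let v := pvGroup verticals
  let h := pvGroup horizontals
  (v.1, v.2, h.1, h.2)

-- ===== PRECONDITION & SPEC =====
def Spec_index_segments (verticals : List (Int × Int × Int)) (horizontals : List (Int × Int × Int)) (out : (List (Int × List (Int × Int))) × List Int × (List (Int × List (Int × Int))) × List Int) : Prop := out = index_segments_alt verticals horizontals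
instance (verticals : List (Int × Int × Int)) (horizontals : List (Int × Int × Int)) (out : (List (Int × List (Int × Int))) × List Int × (List (Int × List (Int × Int))) × List Int) : Decidable (Spec_index_segments verticals horizontals out) := by unfold Spec_index_segments; infer_instance

-- ===== CLAIM (what is proved, stated in full; the proofs are below) =====
def Claim_equal_index_segments : Prop := ∀ (verticals : List (Int × Int × Int)) (horizontals : List (Int × Int × Int)), Dom_index_segments verticals horizontals → Spec_index_segments verticals horizontals (index_segments verticals horizontals)

-- ===== LEMMAS AND PROOFS =====

-- the grouping dict A builds, as a name for the lemmas
def pvBuild (segs : List (Int × Int × Int)) : PySem.Dict Int (List (Int × Int)) :=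
  segs.foldl (fun d t => d.modify t.1 [] (fun l => l ++ [(t.2.1, t.2.2)])) PySem.Dict.empty

theorem pvBuild_keys (segs : List (Int × Int × Int)) :
    (pvBuild segs).keys = PySem.List.dedup (segs.map (·.1)) := by
  unfold pvBuild
  rw [PySem.Dict.keys_foldl_modify_key]
  simp only [PySem.Dict.keys_empty, PySem.List.dedup_eq_ofList]
  exact PySem.Set.update_nil_left (List.map Prod.fst segs)

theorem pvBuild_nodup (segs : List (Int × Int × Int)) : (pvBuild segs).keys.Nodup :=
  PySem.Dict.nodup_keys_foldl_modify_key _ _ _ _ _ PySem.Dict.nodup_keys_empty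

theorem pvBuild_getD (segs : List (Int × Int × Int)) (c : Int) :
    (pvBuild segs).getD c [] = (segs.filter (fun t => t.1 == c)).map (fun t => (t.2.1, t.2.2)) := by
  unfold pvBuild
  have h := PySem.Dict.getD_foldl_modify_append (segs.map (fun t => (t.1, (t.2.1, t.2.2)))) PySem.Dict.empty c
  rw [List.foldl_map] at h
  simpa [List.filter_map, Function.comp] using h

theorem items_eq_keys_map {κ ν : Type} [BEq κ] [LawfulBEq κ] (d : PySem.Dict κ ν) (d0 : ν)
    (h : d.keys.Nodup) : d.items = d.keys.map (fun k => (k, d.getD k d0)) := by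
  simp only [PySem.Dict.keys, List.map_map]
  symm
  apply List.map_congr_left ?_ |>.trans (List.map_id _)
  intro p hp
  have hmem : (p.1, p.2) ∈ d.items := by simpa using hp
  have hd := PySem.Dict.getD_of_mem_items d hmem h d0
  simp_all

theorem pvGroup_eq (segs : List (Int × Int × Int)) :
    (pvBuild segs).items = (pvGroup segs).1 ∧
    PySem.List.sorted (pvBuild segs).keys (fun k => k) false = (pvGroup segs).2 := by
  refine ⟨?_, by rw [pvBuild_keys]; rfl⟩
  rw [items_eq_keys_map (pvBuild segs) [] (pvBuild_nodup segs), pvBuild_keys]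
  exact List.map_congr_left fun k _ => by rw [pvBuild_getD]

-- ===== VERDICT (by name: the statement is the Claim_ definition above) =====
theorem index_segments_spec : Claim_equal_index_segments := by
  intro v h _
  unfold Spec_index_segments index_segments index_segments_alt
  have hv := pvGroup_eq v
  have hh := pvGroup_eq h
  simp only [pvBuild] at hv hh
  simp [hv.1, hv.2, hh.1, hh.2]
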